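-- pv_equiv track=rewrite | github.com/po4yka/obsidian-to-anki | src/obsidian_anki_sync/agents/specialized_agents.py | _repair_code_fences
-- ===== SOURCE A (Python) =====
-- def _repair_code_fences(content: str) -> str:
--     """Repair code fence issues using pattern matching."""
--     lines = content.splitlines()
--     repaired_lines = []
--     fence_stack: list[str] = []
--
--     for line in lines:
--         stripped = line.strip()
--
--         if stripped.startswith("```"):
--             if fence_stack:
--                 # Close current fence
--                 fence_stack.pop()
--                 repaired_lines.append(line)
--             else:
--                 # Start new fence
--                 fence_stack.append(stripped)
--                 repaired_lines.append(line)
--         else: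
--             repaired_lines.append(line)
--
--     # Close any remaining open fences
--     while fence_stack:
--         repaired_lines.append("```")
--         fence_stack.pop()
--
--     return "\n".join(repaired_lines)
-- ===== SOURCE B (Python) =====
-- def _repair_code_fences(content: str) -> str:
--     """Repair code fence issues: count fence lines; if the count is odd, append one closing fence."""
--     lines = content.splitlines()
--     fences = sum(1 for line in lines if line.strip().startswith("```"))
--     if fences % 2 == 1:
--         lines.append("```")
--     return "\n".join(lines)
-- ===== Notes on version B (the rewrite author's own statement) =====
-- stated objective: simpler
-- what changed: Replaced the stateful per-line stack pass (copying each line and pushing/popping a fence stack) by a count of fence lines followed by a single conditional append of one closing fence when the count is odd.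
import Mathlib
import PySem

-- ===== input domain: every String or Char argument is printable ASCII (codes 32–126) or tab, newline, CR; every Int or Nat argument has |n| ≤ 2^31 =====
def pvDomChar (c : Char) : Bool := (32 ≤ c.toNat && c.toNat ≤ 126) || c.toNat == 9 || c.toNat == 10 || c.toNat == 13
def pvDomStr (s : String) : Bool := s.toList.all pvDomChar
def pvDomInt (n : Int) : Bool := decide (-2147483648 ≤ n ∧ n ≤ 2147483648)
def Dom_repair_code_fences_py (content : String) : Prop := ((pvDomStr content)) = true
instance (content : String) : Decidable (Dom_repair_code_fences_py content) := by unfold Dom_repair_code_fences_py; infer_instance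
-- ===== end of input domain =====

-- B replaces A's stateful per-line fence-stack pass by counting fence lines and appending one
-- closing fence when the count is odd (objective: simpler).

-- ===== PORT A =====
-- one iteration of A's for-loop: state is (repaired_lines, fence_stack)
def pvStepA (acc : List String × List String) (line : String) : List String × List String :=
  let stripped := PySem.Str.strip line
  if PySem.Str.startswith stripped "```" then
    if acc.2 ≠ [] then (acc.1 ++ [line], acc.2.tail)
    else (acc.1 ++ [line], acc.2 ++ [stripped])
  else (acc.1 ++ [line], acc.2)

def repair_code_fences_py (content : String) : String :=
  let lines := PySem.Str.splitlines content
  let st := lines.foldl pvStepA ([], [])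
  -- while fence_stack: repaired_lines.append("```"); fence_stack.pop()
  PySem.Str.join "\n" (st.1 ++ List.replicate st.2.length "```")

-- ===== PORT B =====
def repair_code_fences_py_alt (content : String) : String :=
  let lines := PySem.Str.splitlines content
  let fences := lines.countP (fun line => PySem.Str.startswith (PySem.Str.strip line) "```")
  PySem.Str.join "\n" (if fences % 2 = 1 then lines ++ ["```"] else lines)

-- ===== PRECONDITION & SPEC =====
def Spec_repair_code_fences_py (content : String) (out : String) : Prop := out = repair_code_fences_py_alt content
instance (content : String) (out : String) : Decidable (Spec_repair_code_fences_py content out) := by unfold Spec_repair_code_fences_py; infer_instance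

-- ===== CLAIM (what is proved, stated in full; the proofs are below) =====
def Claim_equal_repair_code_fences_py : Prop := ∀ (content : String), Dom_repair_code_fences_py content → Spec_repair_code_fences_py content (repair_code_fences_py content)

-- ===== LEMMAS AND PROOFS =====

-- loop invariant of A's pass: lines are copied unchanged and the stack length tracks the
-- parity of the number of fence lines seen (given it starts with length ≤ 1)
theorem pvLoopA_inv (lines : List String) (rep stack : List String) (h : stack.length ≤ 1) :
    (lines.foldl pvStepA (rep, stack)).1 = rep ++ lines ∧
    (lines.foldl pvStepA (rep, stack)).2.length
      = (stack.length + lines.countP (fun l => PySem.Str.startswith (PySem.Str.strip l) "```")) % 2 := by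
  induction lines generalizing rep stack with
  | nil => simp at h ⊢; omega
  | cons l ls ih =>
    simp only [List.foldl_cons, pvStepA]
    by_cases hp : PySem.Str.startswith (PySem.Str.strip l) "```" = true
    · rw [if_pos hp, List.countP_cons_of_pos (p := fun l => PySem.Str.startswith (PySem.Str.strip l) "```") hp]
      cases stack with
      | nil =>
        rw [if_neg (by simp)]
        obtain ⟨h1, h2⟩ := ih (rep ++ [l]) ([] ++ [PySem.Str.strip l]) (by simp)
        refine ⟨by simpa using h1, ?_⟩
        rw [h2]; simp; omega
      | cons a as =>
        have has : as = [] := List.length_eq_zero_iff.mp (by simpa using h)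
        subst has
        rw [if_pos (by simp)]
        obtain ⟨h1, h2⟩ := ih (rep ++ [l]) [] (by simp)
        refine ⟨by simpa using h1, ?_⟩
        simp only [List.tail_cons]
        rw [h2]; simp; omega
    · rw [if_neg hp, List.countP_cons_of_neg (p := fun l => PySem.Str.startswith (PySem.Str.strip l) "```") (by simpa using hp)]
      obtain ⟨h1, h2⟩ := ih (rep ++ [l]) stack h
      exact ⟨by simpa using h1, h2⟩

-- ===== VERDICT (by name: the statement is the Claim_ definition above) =====
theorem repair_code_fences_py_spec : Claim_equal_repair_code_fences_py := by
  intro content _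
  show repair_code_fences_py content = repair_code_fences_py_alt content
  obtain ⟨h1, h2⟩ := pvLoopA_inv (PySem.Str.splitlines content) [] [] (by simp)
  show PySem.Str.join "\n"
      ((List.foldl pvStepA ([], []) (PySem.Str.splitlines content)).1
        ++ List.replicate (List.foldl pvStepA ([], []) (PySem.Str.splitlines content)).2.length "```")
    = PySem.Str.join "\n"
      (if ((PySem.Str.splitlines content).countP
            (fun line => PySem.Str.startswith (PySem.Str.strip line) "```")) % 2 = 1
        then PySem.Str.splitlines content ++ ["```"] else PySem.Str.splitlines content)
  rw [h1, h2]
  simp only [List.length_nil, Nat.zero_add, List.nil_append]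
  rcases Nat.mod_two_eq_zero_or_one
      ((PySem.Str.splitlines content).countP (fun l => PySem.Str.startswith (PySem.Str.strip l) "```")) with he | ho
  · rw [he, if_neg (by decide)]
    simp
  · rw [ho, if_pos rfl]
    simp
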